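-- pv_equiv track=rewrite | github.com/dopexthrone/MeaningWorks | core/trust.py | compute_badge
-- ===== SOURCE A (Python) =====
-- from typing import Dict, Any, List, Tuple, Optional
--
-- _CORE_DIMENSIONS = ("completeness", "consistency", "coherence", "traceability")
--
-- _VERIFIED_THRESHOLD = 70
--
-- _PARTIAL_THRESHOLD = 40
--
-- def compute_badge(fidelity_scores: Dict[str, int]) -> str:
--     """Compute verification badge from fidelity scores.
--
--     Logic:
--     - "verified" — All 4 core dimensions >= 70
--     - "partial" — No core dimension < 40, but some < 70
--     - "unverified" — Any core dimension < 40
--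
--     Args:
--         fidelity_scores: Dimension name → score (0-100)
--
--     Returns:
--         "verified" | "partial" | "unverified"
--     """
--     core_scores = []
--     for dim in _CORE_DIMENSIONS:
--         score = fidelity_scores.get(dim, 0)
--         core_scores.append(score)
--
--     if not core_scores:
--         return "unverified"
--
--     if any(s < _PARTIAL_THRESHOLD for s in core_scores):
--         return "unverified"
--
--     if all(s >= _VERIFIED_THRESHOLD for s in core_scores):
--         return "verified"
--
--     return "partial"
-- ===== SOURCE B (Python) =====
-- _CORE_DIMENSIONS = ("completeness", "consistency", "coherence", "traceability")
-- _VERIFIED_THRESHOLD = 70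
-- _PARTIAL_THRESHOLD = 40
--
-- def compute_badge(fidelity_scores):
--     # Single recursive pass with early exit: stop at the first score below 40,
--     # otherwise thread an 'all high so far' flag through the recursion.
--     def walk(dims, all_high):
--         if not dims:
--             return "verified" if all_high else "partial"
--         s = fidelity_scores.get(dims[0], 0)
--         if s < _PARTIAL_THRESHOLD:
--             return "unverified"
--         return walk(dims[1:], all_high and s >= _VERIFIED_THRESHOLD)
--     return walk(list(_CORE_DIMENSIONS), True)
-- ===== Notes on version B (the rewrite author's own statement) =====
-- stated objective: alternative
-- what changed: Replaces A's list-building plus two staged any(<40)/all(>=70) scans by one recursive pass over the dimensions with early exit on the first score below 40, threading an all-high accumulator flag; no intermediate score list is built.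
import Mathlib
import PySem

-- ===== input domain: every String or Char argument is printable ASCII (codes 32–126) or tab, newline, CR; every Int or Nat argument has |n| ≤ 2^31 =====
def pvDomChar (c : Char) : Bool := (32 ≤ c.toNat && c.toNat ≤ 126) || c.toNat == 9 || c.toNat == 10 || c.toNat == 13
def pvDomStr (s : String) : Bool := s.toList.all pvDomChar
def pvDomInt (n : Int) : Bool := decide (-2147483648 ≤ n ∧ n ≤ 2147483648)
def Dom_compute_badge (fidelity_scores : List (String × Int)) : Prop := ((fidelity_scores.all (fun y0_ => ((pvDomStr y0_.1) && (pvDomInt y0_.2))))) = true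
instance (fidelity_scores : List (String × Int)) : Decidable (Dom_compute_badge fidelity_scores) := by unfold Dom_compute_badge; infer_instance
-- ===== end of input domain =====

-- B replaces A's list build plus two staged scans by one recursive early-exit pass with an accumulator flag (objective: alternative).

-- ===== PORT A =====
def pvDims : List String := ["completeness", "consistency", "coherence", "traceability"]

def compute_badge (fidelity_scores : List (String × Int)) : String :=
  let core_scores := pvDims.foldl (fun acc dim => acc ++ [PySem.Dict.getD (PySem.Dict.mk fidelity_scores) dim (0 : Int)]) []
  if core_scores = [] then "unverified"
  else if core_scores.any (fun s => s < 40) then "unverified"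
  else if core_scores.all (fun s => s ≥ 70) then "verified"
  else "partial"

-- ===== PORT B =====
-- recursive walk over the dimension names: early return on the first score < 40,
-- otherwise thread the 'all high so far' flag
def pvWalkBadge (fidelity_scores : List (String × Int)) : List String → Bool → String
  | [], allHigh => if allHigh then "verified" else "partial"
  | d :: rest, allHigh =>
    let s := PySem.Dict.getD (PySem.Dict.mk fidelity_scores) d (0 : Int)
    if s < 40 then "unverified"
    else pvWalkBadge fidelity_scores rest (allHigh && decide (s ≥ 70))

def compute_badge_alt (fidelity_scores : List (String × Int)) : String :=
  pvWalkBadge fidelity_scores pvDims true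

-- ===== PRECONDITION & SPEC =====
def Spec_compute_badge (fidelity_scores : List (String × Int)) (out : String) : Prop := out = compute_badge_alt fidelity_scores
instance (fidelity_scores : List (String × Int)) (out : String) : Decidable (Spec_compute_badge fidelity_scores out) := by unfold Spec_compute_badge; infer_instance

-- ===== CLAIM (what is proved, stated in full; the proofs are below) =====
def Claim_equal_compute_badge : Prop := ∀ (fidelity_scores : List (String × Int)), Dom_compute_badge fidelity_scores → Spec_compute_badge fidelity_scores (compute_badge fidelity_scores)

-- ===== LEMMAS AND PROOFS =====

-- A's staged any/all tests over the 4 scores agree with B's early-exit walk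
theorem badge_key (fs : List (String × Int)) (a b c d : Int)
    (ha : PySem.Dict.getD (PySem.Dict.mk fs) "completeness" (0 : Int) = a)
    (hb : PySem.Dict.getD (PySem.Dict.mk fs) "consistency" (0 : Int) = b)
    (hc : PySem.Dict.getD (PySem.Dict.mk fs) "coherence" (0 : Int) = c)
    (hd : PySem.Dict.getD (PySem.Dict.mk fs) "traceability" (0 : Int) = d) :
    (if ([a, b, c, d] : List Int) = [] then "unverified"
     else if ([a, b, c, d] : List Int).any (fun s => decide (s < 40)) then "unverified"
     else if ([a, b, c, d] : List Int).all (fun s => decide (s ≥ 70)) then "verified"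
     else "partial")
    = pvWalkBadge fs pvDims true := by
  simp only [pvWalkBadge, pvDims, ha, hb, hc, hd, List.any_cons, List.any_nil, List.all_cons,
    List.all_nil, Bool.or_eq_true, Bool.and_eq_true, decide_eq_true_eq, Bool.or_false,
    Bool.and_true, Bool.true_and, reduceCtorEq, if_false]
  split_ifs <;> simp_all

-- ===== VERDICT (by name: the statement is the Claim_ definition above) =====
theorem compute_badge_spec : Claim_equal_compute_badge := by
  intro fs _
  unfold Spec_compute_badge compute_badge compute_badge_alt pvDims
  simp only [List.foldl, List.nil_append, List.cons_append]
  exact badge_key fs _ _ _ _ rfl rfl rfl rfl
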